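-- pv_equiv track=rewrite | github.com/Sheynis75/Article-Similarity-Checker | finalproject (1).py | paragraph_splitter
-- ===== SOURCE A (Python) =====
-- def paragraph_splitter(s):
--     """splits paragraph into strings"""
--     new_dictionary = {}
--     count = 0
--     r = s.split()
--     for word in r:
--         count += 1
--         if word[-1] in '.?!':
--                 if count in new_dictionary:
--                     new_dictionary[count] += 1
--                 else:
--                     new_dictionary[count] = 1
--                 count = 0
--     return new_dictionary
-- ===== SOURCE B (Python) =====
-- from collections import Counter
--
-- def paragraph_splitter(s):
--     """splits paragraph into strings"""
--     r = s.split()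
--     idxs = [i for i, w in enumerate(r) if w[-1] in '.?!']
--     lens = [i - p for i, p in zip(idxs, [-1] + idxs)]
--     return dict(Counter(lens))
-- ===== Notes on version B (the rewrite author's own statement) =====
-- stated objective: alternative
-- what changed: Replaces A's running-counter-with-reset dict tally by computing the indices of sentence-ending words, taking gaps between consecutive indices as sentence lengths, and counting them with collections.Counter.
import Mathlib
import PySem

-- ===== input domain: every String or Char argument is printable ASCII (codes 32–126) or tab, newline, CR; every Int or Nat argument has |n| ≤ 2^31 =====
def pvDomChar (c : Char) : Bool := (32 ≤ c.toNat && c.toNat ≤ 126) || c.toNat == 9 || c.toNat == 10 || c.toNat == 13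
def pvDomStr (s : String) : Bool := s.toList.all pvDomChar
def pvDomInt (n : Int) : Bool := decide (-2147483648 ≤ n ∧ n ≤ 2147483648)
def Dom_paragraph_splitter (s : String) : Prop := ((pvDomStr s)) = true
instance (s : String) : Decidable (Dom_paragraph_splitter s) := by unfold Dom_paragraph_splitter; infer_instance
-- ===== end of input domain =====

-- B replaces A's running-counter-with-reset dict tally by sentence-end indices, gaps between
-- consecutive indices as sentence lengths, and a Counter over those lengths (objective: alternative).

-- ===== PORT A =====
-- the test `word[-1] in '.?!'` (words from split() are nonempty, so word[-1] never raises)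
def pvIsEnd (w : String) : Bool :=
  PySem.Str.pyGet? w (-1) == some '.' || PySem.Str.pyGet? w (-1) == some '?'
    || PySem.Str.pyGet? w (-1) == some '!'

def paragraph_splitter (s : String) : List (Int × Int) :=
  let r := PySem.Str.split₀ s
  let st := r.foldl
    (fun (st : PySem.Dict Int Int × Int) (word : String) =>
      let count := st.2 + 1
      if pvIsEnd word then
        let d := if st.1.contains count then st.1.modify count 0 (· + 1)
                 else st.1.insert count 1
        (d, 0)
      else (st.1, count))
    (PySem.Dict.empty, 0)
  st.1.items

-- ===== PORT B =====
def paragraph_splitter_alt (s : String) : List (Int × Int) :=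
  let r := PySem.Str.split₀ s
  let idxs := ((PySem.List.enumerate r).filter (fun p => pvIsEnd p.2)).map (·.1)
  let lens := (idxs.zip ((-1 : Int) :: idxs)).map (fun p => p.1 - p.2)
  (PySem.Dict.counter lens).items

-- ===== PRECONDITION & SPEC =====
def Spec_paragraph_splitter (s : String) (out : List (Int × Int)) : Prop := out = paragraph_splitter_alt s
instance (s : String) (out : List (Int × Int)) : Decidable (Spec_paragraph_splitter s out) := by unfold Spec_paragraph_splitter; infer_instance

-- ===== CLAIM (what is proved, stated in full; the proofs are below) =====
def Claim_equal_paragraph_splitter : Prop := ∀ (s : String), Dom_paragraph_splitter s → Spec_paragraph_splitter s (paragraph_splitter s)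

-- ===== LEMMAS AND PROOFS =====

-- sentence lengths as A computes them: running word counter, reset at each sentence end
def pvSentLens (c : Int) : List String → List Int
  | [] => []
  | w :: ws => if pvIsEnd w then (c + 1) :: pvSentLens 0 ws else pvSentLens (c + 1) ws

-- A's counting step equals Counter's step
theorem pv_stepA_eq_modify (d : PySem.Dict Int Int) (k : Int) :
    (if d.contains k then d.modify k 0 (· + 1) else d.insert k 1) = d.modify k 0 (· + 1) := by
  by_cases h : d.contains k
  · simp [h]
  · have hf : d.contains k = false := by simpa using h
    have h2 : d.get? k = none := by
      simpa [PySem.Dict.get?_eq_none_iff_contains] using hf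
    simp [hf, PySem.Dict.modify, PySem.Dict.insert, PySem.Dict.getD, h2]

-- A's fold is a Counter fold over the sentence-length list
theorem pv_foldA (ws : List String) (d : PySem.Dict Int Int) (c : Int) :
    (ws.foldl
      (fun (st : PySem.Dict Int Int × Int) (word : String) =>
        let count := st.2 + 1
        if pvIsEnd word then
          ((if st.1.contains count then st.1.modify count 0 (· + 1)
            else st.1.insert count 1), 0)
        else (st.1, count))
      (d, c)).1
    = (pvSentLens c ws).foldl (fun d x => d.modify x 0 (· + 1)) d := by
  induction ws generalizing d c with
  | nil => simp [pvSentLens]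
  | cons w ws ih =>
    by_cases h : pvIsEnd w
    · simp only [List.foldl_cons, pvSentLens, h, if_true]
      rw [pv_stepA_eq_modify]
      exact ih _ _
    · simp only [List.foldl_cons, pvSentLens, h, if_false, Bool.false_eq_true]
      exact ih _ _

-- zip-with-shifted-self computes consecutive gaps
def pvGaps (p : Int) : List Int → List Int
  | [] => []
  | i :: is => (i - p) :: pvGaps i is

theorem pv_zip_gaps (p : Int) (is : List Int) :
    ((is.zip (p :: is)).map (fun q => q.1 - q.2)) = pvGaps p is := by
  induction is generalizing p with
  | nil => rfl
  | cons i is ih => simp [pvGaps, List.zip_cons_cons, ih]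

-- gaps between sentence-end indices are exactly A's sentence lengths
theorem pv_gaps_idx (ws : List String) (k c : Int) :
    pvGaps (k - 1 - c)
      (((PySem.List.enumerate ws k).filter (fun p => pvIsEnd p.2)).map (·.1))
    = pvSentLens c ws := by
  induction ws generalizing k c with
  | nil => simp [PySem.List.enumerate_nil, pvGaps, pvSentLens]
  | cons w ws ih =>
    rw [PySem.List.enumerate_cons]
    by_cases h : pvIsEnd w
    · simp only [List.filter_cons, h, if_true, List.map_cons, pvGaps, pvSentLens]
      have e1 : k - (k - 1 - c) = c + 1 := by ring
      rw [e1]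
      have h3 := ih (k + 1) 0
      have e2 : k + 1 - 1 - 0 = k := by ring
      rw [e2] at h3
      rw [h3]
    · simp only [List.filter_cons, h, if_false, pvSentLens, Bool.false_eq_true]
      have e : k - 1 - c = (k + 1) - 1 - (c + 1) := by ring
      rw [e]
      exact ih (k + 1) (c + 1)

theorem pv_core (ws : List String) :
    (ws.foldl
      (fun (st : PySem.Dict Int Int × Int) (word : String) =>
        let count := st.2 + 1
        if pvIsEnd word then
          ((if st.1.contains count then st.1.modify count 0 (· + 1)
            else st.1.insert count 1), 0)
        else (st.1, count))
      (PySem.Dict.empty, 0)).1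
    = PySem.Dict.counter
        (((((PySem.List.enumerate ws).filter (fun p => pvIsEnd p.2)).map (·.1)).zip
            ((-1 : Int) :: ((PySem.List.enumerate ws).filter (fun p => pvIsEnd p.2)).map (·.1))).map
          (fun p => p.1 - p.2)) := by
  rw [pv_foldA, pv_zip_gaps]
  have e : (-1 : Int) = 0 - 1 - 0 := by ring
  rw [e, pv_gaps_idx ws 0 0, PySem.Dict.counter_eq_foldl]

-- ===== VERDICT (by name: the statement is the Claim_ definition above) =====
theorem paragraph_splitter_spec : Claim_equal_paragraph_splitter := by
  intro s _
  unfold Spec_paragraph_splitter paragraph_splitter paragraph_splitter_alt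
  simp only []
  rw [pv_core]
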